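-- pv_equiv track=rewrite | github.com/This-is-heeeeee/Algorithm | study/chapter18/42_a_boarding_gate.py | DFS
-- ===== SOURCE A (Python) =====
-- def DFS(current_plane, gi, available_gates, count):
--     counts = []
--     if current_plane >= len(gi):
--         return count
--
--     for i in range(gi[current_plane]):
--         temp = available_gates.copy()
--         if temp[i]:
--             temp[i] = False
--             counts.append(DFS(current_plane+1, gi, temp, count + 1))
--
--     if counts:
--         return max(counts)
--     else:
--         return count
-- ===== SOURCE B (Python) =====
-- def DFS(current_plane, gi, available_gates, count):
--     # Greedy: dock each plane in order at the LARGEST still-available gate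
--     # below its limit; stop at the first plane that cannot dock.
--     gates = list(available_gates)
--     total = count
--     for limit in gi[current_plane:]:
--         best = -1
--         i = min(limit, len(gates)) - 1
--         while i >= 0:
--             if gates[i]:
--                 best = i
--                 break
--             i -= 1
--         if best == -1:
--             break
--         gates[best] = False
--         total += 1
--     return total
-- ===== Notes on version B (the rewrite author's own statement) =====
-- stated objective: alternative
-- what changed: Replaced the branch-and-bound recursion that tries every available gate for every plane by a single greedy pass that docks each plane at the largest still-available gate below its limit and stops at the first failure (an exchange argument, proved in the Lean file, shows this greedy choice attains A's maximum).
-- outside the precondition, e.g. on DFS(-1, [2, 2], [True, True], 0): A returns 2, B returns 1; on DFS(0, [1, 1, 100], [True], 0): A returns 1, B returns 1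
import Mathlib
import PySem

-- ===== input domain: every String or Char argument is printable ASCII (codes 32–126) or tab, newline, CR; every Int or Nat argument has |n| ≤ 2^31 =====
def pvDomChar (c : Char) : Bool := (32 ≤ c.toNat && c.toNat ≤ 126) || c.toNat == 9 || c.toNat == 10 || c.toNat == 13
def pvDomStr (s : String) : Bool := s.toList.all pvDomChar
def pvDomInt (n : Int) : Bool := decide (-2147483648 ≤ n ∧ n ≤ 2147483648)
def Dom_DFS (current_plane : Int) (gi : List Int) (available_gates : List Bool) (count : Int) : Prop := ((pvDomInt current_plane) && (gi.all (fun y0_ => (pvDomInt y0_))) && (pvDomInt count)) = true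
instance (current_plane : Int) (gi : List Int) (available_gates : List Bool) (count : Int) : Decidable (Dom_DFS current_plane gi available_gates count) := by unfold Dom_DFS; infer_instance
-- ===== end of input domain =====

-- B replaces A's exponential search over all gate assignments by one greedy pass
-- (dock each plane at the largest free gate below its limit); proved equal to A's maximum.

-- ===== PORT A =====
def DFS (current_plane : Int) (gi : List Int) (available_gates : List Bool) (count : Int) : Int :=
  if _h : current_plane ≥ (gi.length : Int) then count
  else
    let counts := (PySem.List.pyRange 0 ((PySem.List.pyGet? gi current_plane).getD 0) 1).foldl
      (fun acc i =>
        if (PySem.List.pyGet? available_gates i).getD false then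
          acc ++ [DFS (current_plane + 1) gi (available_gates.set i.toNat false) (count + 1)]
        else acc) []
    match PySem.List.max? counts (fun y => y) with
    | some m => m
    | none => count
termination_by ((gi.length : Int) - current_plane).toNat
decreasing_by omega

-- ===== PORT B =====
-- inner 'while i >= 0' scan for the largest free gate at index ≤ i
def findBest (gates : List Bool) (i : Int) : Int :=
  if _h : i < 0 then -1
  else if (PySem.List.pyGet? gates i).getD false then i
  else findBest gates (i - 1)
termination_by (i + 1).toNat
decreasing_by omega

-- 'for limit in gi[current_plane:]' loop with its two early exits
def bLoop (limits : List Int) (gates : List Bool) (total : Int) : Int :=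
  match limits with
  | [] => total
  | limit :: rest =>
    let best := findBest gates (min limit (gates.length : Int) - 1)
    if best = -1 then total
    else bLoop rest (gates.set best.toNat false) (total + 1)

def DFS_alt (current_plane : Int) (gi : List Int) (available_gates : List Bool) (count : Int) : Int :=
  bLoop (PySem.List.slice gi (some current_plane) none) available_gates count

-- ===== PRECONDITION & SPEC =====
-- Pre_ excludes (a) negative current_plane — outside the natural domain: Python's
-- negative-index wraparound makes A process the wrapped suffix and then the whole list
-- again — and (b) inputs where a reachable plane's gate limit exceeds len(available_gates),
-- on which Python A raises IndexError; the blocker clause (some earlier plane has no free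
-- gate below its limit even in the initial gate list, so A stops before the bad plane)
-- keeps most inputs where such a plane is unreachable, but is a closed-form
-- over-approximation: it cannot see planes blocked only by earlier gate consumption.
def Pre_DFS (current_plane : Int) (gi : List Int) (available_gates : List Bool) (count : Int) : Prop :=
  0 ≤ current_plane ∧
  ∀ p : Nat, p < gi.length → current_plane ≤ (p : Int) →
    (gi.getD p 0 ≤ (available_gates.length : Int) ∨
     ∃ q : Nat, q < p ∧ current_plane ≤ (q : Int) ∧
       ∀ i : Nat, i < available_gates.length → (i : Int) < gi.getD q 0 →
         available_gates.getD i false = false)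

instance (current_plane : Int) (gi : List Int) (available_gates : List Bool) (count : Int) : Decidable (Pre_DFS current_plane gi available_gates count) := by unfold Pre_DFS; infer_instance

def pvWitness_DFS : Int × List Int × List Bool × Int := (0, [2, 1], [true, true], 0)

def Spec_DFS (current_plane : Int) (gi : List Int) (available_gates : List Bool) (count : Int) (out : Int) : Prop := out = DFS_alt current_plane gi available_gates count
instance (current_plane : Int) (gi : List Int) (available_gates : List Bool) (count : Int) (out : Int) : Decidable (Spec_DFS current_plane gi available_gates count out) := by unfold Spec_DFS; infer_instance

-- ===== CLAIM (what is proved, stated in full; the proofs are below) =====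
def Claim_equal_DFS : Prop := ∀ (current_plane : Int) (gi : List Int) (available_gates : List Bool) (count : Int), Dom_DFS current_plane gi available_gates count → Pre_DFS current_plane gi available_gates count → Spec_DFS current_plane gi available_gates count (DFS current_plane gi available_gates count)

-- ===== LEMMAS AND PROOFS =====

-- candidate gate indices for a plane with limit g
def cand (g : Int) (s : List Bool) : List Nat :=
  (List.range g.toNat).filter (fun i => s.getD i false)

-- the value A's recursion maximises, per suffix of planes
def N : List Int → List Bool → Nat
  | [], _ => 0
  | g :: ps, s => (cand g s).foldl (fun m i => max m (1 + N ps (s.set i false))) 0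

-- largest free gate below n (Nat form of findBest)
def fb (s : List Bool) : Nat → Option Nat
  | 0 => none
  | k + 1 => if s.getD k false then some k else fb s k

-- the greedy count (Nat form of bLoop)
def G : List Int → List Bool → Nat
  | [], _ => 0
  | g :: ps, s =>
    match fb s g.toNat with
    | none => 0
    | some j => 1 + G ps (s.set j false)

-- number of free gates below k
def cb (s : List Bool) : Nat → Nat
  | 0 => 0
  | k + 1 => cb s k + (if s.getD k false then 1 else 0)

theorem avail_lt {s : List Bool} {i : Nat} (h : s.getD i false = true) : i < s.length := by
  by_contra hn
  rw [List.getD_eq_default _ _ (by omega)] at h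
  exact absurd h (by simp)

theorem getD_set_self {s : List Bool} {i : Nat} (h : i < s.length) :
    (s.set i false).getD i false = false := by
  simp [List.getD_eq_getElem?_getD, List.getElem?_set_self' , h]

theorem getD_set_ne {s : List Bool} {i m : Nat} (h : m ≠ i) :
    (s.set i false).getD m false = s.getD m false := by
  simp [List.getD_eq_getElem?_getD, List.getElem?_set_ne (by omega : i ≠ m)]

theorem gd (s : List Bool) (i : Nat) : s.getD i false = s[i]?.getD false :=
  List.getD_eq_getElem?_getD

theorem cb_succ (s : List Bool) (k : Nat) :
    cb s (k + 1) = cb s k + (if s.getD k false then 1 else 0) := rfl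

theorem cb_mono (s : List Bool) {k k' : Nat} (h : k ≤ k') : cb s k ≤ cb s k' := by
  have key : ∀ j, cb s k ≤ cb s (k + j) := by
    intro j
    induction j with
    | zero => exact le_refl _
    | succ j ih =>
      have := cb_succ s (k + j)
      have hx : k + (j + 1) = (k + j) + 1 := by omega
      rw [hx, cb_succ]
      split_ifs <;> omega
  have := key (k' - k)
  have hx : k + (k' - k) = k' := by omega
  rwa [hx] at this

theorem cb_set_of_ge {s : List Bool} {i k : Nat} (h : k ≤ i) :
    cb (s.set i false) k = cb s k := by
  induction k with
  | zero => rfl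
  | succ n ih =>
    rw [cb_succ, cb_succ, ih (by omega), getD_set_ne (by omega)]

theorem cb_set_of_lt {s : List Bool} {i k : Nat} (hik : i < k) (ha : s.getD i false = true) :
    cb (s.set i false) k + 1 = cb s k := by
  induction k with
  | zero => omega
  | succ n ih =>
    rcases Nat.lt_or_ge i n with h' | h'
    · rw [cb_succ, cb_succ, getD_set_ne (by omega)]
      have := ih h'; omega
    · have hin : i = n := by omega
      subst hin
      rw [cb_succ, cb_succ, cb_set_of_ge (le_refl i), getD_set_self (avail_lt ha), ha]
      simp

theorem cb_eq_of_no_avail {s : List Bool} {k n : Nat} (hk : k ≤ n)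
    (h : ∀ m, k ≤ m → m < n → s.getD m false = false) : cb s n = cb s k := by
  induction n with
  | zero =>
    have hk0 : k = 0 := by omega
    rw [hk0]
  | succ n ih =>
    rcases Nat.lt_or_ge k (n + 1) with h' | h'
    · rw [cb_succ, h n (by omega) (by omega), ih (by omega) (fun m hm hm' => h m hm (by omega))]
      simp
    · have hk : k = n + 1 := by omega
      rw [hk]

theorem fb_some {s : List Bool} {n j : Nat} (h : fb s n = some j) :
    j < n ∧ s.getD j false = true ∧ ∀ m, j < m → m < n → s.getD m false = false := by
  induction n with
  | zero => simp [fb] at h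
  | succ k ih =>
    rw [fb] at h
    by_cases hk : s.getD k false = true
    · rw [if_pos hk] at h
      injection h with h
      subst h
      exact ⟨by omega, hk, fun m h1 h2 => by omega⟩
    · rw [if_neg hk] at h
      obtain ⟨h1, h2, h3⟩ := ih h
      refine ⟨by omega, h2, fun m hm1 hm2 => ?_⟩
      rcases Nat.lt_or_ge m k with hmk | hmk
      · exact h3 m hm1 hmk
      · have hx : m = k := by omega
        subst hx; simpa using hk

theorem fb_none {s : List Bool} {n : Nat} (h : fb s n = none) :
    ∀ m, m < n → s.getD m false = false := by
  induction n with
  | zero => omega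
  | succ k ih =>
    rw [fb] at h
    by_cases hk : s.getD k false = true
    · rw [if_pos hk] at h
      exact absurd h (by simp)
    · rw [if_neg hk] at h
      intro m hm
      rcases Nat.lt_or_ge m k with hmk | hmk
      · exact ih h m hmk
      · have hx : m = k := by omega
        subst hx; simpa using hk

theorem fb_exists {s : List Bool} {n m : Nat} (hm : m < n) (ha : s.getD m false = true) :
    ∃ j, fb s n = some j ∧ m ≤ j := by
  induction n with
  | zero => omega
  | succ k ih =>
    rw [fb]
    by_cases hk : s.getD k false = true
    · exact ⟨k, by rw [if_pos hk], by omega⟩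
    · have hmk : m < k := by
        rcases Nat.lt_or_ge m k with h' | h'
        · exact h'
        · have hx : m = k := by omega
          subst hx; exact absurd ha hk
      obtain ⟨j, hj, hmj⟩ := ih hmk
      exact ⟨j, by rw [if_neg hk]; exact hj, hmj⟩

theorem cb_zero_of_fb_none {s : List Bool} {n : Nat} (h : fb s n = none) : cb s n = 0 := by
  have := cb_eq_of_no_avail (Nat.zero_le n) (fun m _ hm => fb_none h m hm)
  simpa [cb] using this

theorem fb_succ_of_ge {s : List Bool} {k : Nat} (h : s.length ≤ k) :
    fb s (k + 1) = fb s k := by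
  rw [fb, List.getD_eq_default _ _ h]
  simp

theorem fb_ge {s : List Bool} {n : Nat} (h : s.length ≤ n) : fb s n = fb s s.length := by
  induction n with
  | zero => have : s.length = 0 := by omega
            rw [this]
  | succ k ih =>
    rcases Nat.lt_or_ge k s.length with h' | h'
    · have : s.length = k + 1 := by omega
      rw [this]
    · rw [fb_succ_of_ge h', ih h']

theorem mem_cand {g : Int} {s : List Bool} {i : Nat} :
    i ∈ cand g s ↔ i < g.toNat ∧ s.getD i false = true := by
  simp [cand]

theorem foldl_max_le {l : List Nat} {f : Nat → Nat} {b c : Nat} (hb : b ≤ c)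
    (h : ∀ i ∈ l, f i ≤ c) : l.foldl (fun m i => max m (f i)) b ≤ c := by
  induction l generalizing b with
  | nil => simpa
  | cons x t ih =>
    simp only [List.foldl_cons]
    exact ih (by have := h x (by simp); omega) (fun i hi => h i (by simp [hi]))

theorem le_foldl_max_elem {l : List Nat} {f : Nat → Nat} {b : Nat} {i : Nat} (hi : i ∈ l) :
    f i ≤ l.foldl (fun m i => max m (f i)) b :=
  (PySem.List.le_foldl_max_nat l f b).2 i hi

-- state t dominates state s: at least as many free gates below every bound
def Domi (t s : List Bool) : Prop := ∀ k, cb s k ≤ cb t k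

theorem domi_step {s t : List Bool} {i i' : Nat} (hd : Domi t s)
    (hi' : i' ≤ i) (hai : s.getD i false = true) (hai' : t.getD i' false = true)
    (hno : ∀ m, i' < m → m < i + 1 → t.getD m false = false) :
    Domi (t.set i' false) (s.set i false) := by
  intro k
  rcases Nat.lt_or_ge i k with hik | hik
  · -- i < k (hence i' < k): both lose one below k
    have h1 := cb_set_of_lt hik hai
    have h2 := cb_set_of_lt (by omega : i' < k) hai'
    have := hd k
    omega
  · rcases Nat.lt_or_ge i' k with hik' | hik'
    · -- i' < k ≤ i
      have h2 := cb_set_of_lt hik' hai'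
      have h1 : cb (s.set i false) k = cb s k := cb_set_of_ge hik
      have ht : cb t (i + 1) = cb t k :=
        cb_eq_of_no_avail (by omega) (fun m hm hm' => hno m (by omega) hm')
      have hs1 : cb s i + 1 = cb s (i + 1) := by rw [cb_succ, hai]; simp
      have hs2 : cb s k ≤ cb s i := cb_mono s (by omega)
      have := hd (i + 1)
      omega
    · -- k ≤ i' ≤ i: untouched below k
      rw [cb_set_of_ge hik, cb_set_of_ge hik']
      exact hd k

theorem N_mono : ∀ (ps : List Int) {s t : List Bool}, Domi t s → N ps s ≤ N ps t := by
  intro ps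
  induction ps with
  | nil => intro s t _; simp [N]
  | cons g rest ih =>
    intro s t hd
    show N (g :: rest) s ≤ N (g :: rest) t
    rw [N]
    apply foldl_max_le (Nat.zero_le _)
    intro i hi
    obtain ⟨hig, hai⟩ := mem_cand.mp hi
    -- t has a free gate i' ≤ i
    have hcb : 1 ≤ cb t (i + 1) := by
      have h1 : cb s (i + 1) = cb s i + 1 := by rw [cb_succ, hai]; simp
      have := hd (i + 1)
      omega
    have hfb : ∃ j, fb t (i + 1) = some j := by
      cases hft : fb t (i + 1) with
      | none => have := cb_zero_of_fb_none hft; omega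
      | some j => exact ⟨j, rfl⟩
    obtain ⟨i', hfi'⟩ := hfb
    obtain ⟨hlt, hai', hno⟩ := fb_some hfi'
    have hi'c : i' ∈ cand g t := mem_cand.mpr ⟨by omega, hai'⟩
    have hdom := domi_step hd (by omega) hai hai' hno
    calc 1 + N rest (s.set i false) ≤ 1 + N rest (t.set i' false) := by
            have := ih hdom; omega
      _ ≤ N (g :: rest) t := by
            rw [N]
            exact le_foldl_max_elem (f := fun i => 1 + N rest (t.set i false)) hi'c

theorem domi_set {s : List Bool} {i j : Nat} (hij : i ≤ j)
    (hai : s.getD i false = true) (haj : s.getD j false = true) :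
    Domi (s.set j false) (s.set i false) := by
  intro k
  rcases Nat.lt_or_ge j k with h1 | h1
  · have := cb_set_of_lt h1 haj
    have := cb_set_of_lt (by omega : i < k) hai
    omega
  · rcases Nat.lt_or_ge i k with h2 | h2
    · have ha := cb_set_of_lt h2 hai
      have hb : cb (s.set j false) k = cb s k := cb_set_of_ge h1
      omega
    · rw [cb_set_of_ge h1, cb_set_of_ge h2]

theorem N_eq_G : ∀ (ps : List Int) (s : List Bool), N ps s = G ps s := by
  intro ps
  induction ps with
  | nil => intro s; rfl
  | cons g rest ih =>
    intro s
    rw [N, G]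
    cases hfb : fb s g.toNat with
    | none =>
      have hc : cand g s = [] := by
        rw [cand, List.filter_eq_nil_iff]
        intro i hi
        rw [List.mem_range] at hi
        have hf := fb_none hfb i hi
        rw [gd] at hf
        simp [hf]
      rw [hc]
      rfl
    | some j =>
      obtain ⟨hjg, haj, _⟩ := fb_some hfb
      have hjc : j ∈ cand g s := mem_cand.mpr ⟨hjg, haj⟩
      have hle : (cand g s).foldl (fun m i => max m (1 + N rest (s.set i false))) 0
          ≤ 1 + N rest (s.set j false) := by
        apply foldl_max_le (Nat.zero_le _)
        intro i hi
        obtain ⟨hig, hai⟩ := mem_cand.mp hi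
        obtain ⟨j', hj', hij'⟩ := fb_exists hig hai
        rw [hfb] at hj'
        injection hj' with hj'
        subst hj'
        have := N_mono rest (domi_set hij' hai haj)
        omega
      have hge : 1 + N rest (s.set j false)
          ≤ (cand g s).foldl (fun m i => max m (1 + N rest (s.set i false))) 0 :=
        le_foldl_max_elem (f := fun i => 1 + N rest (s.set i false)) hjc
      rw [Nat.le_antisymm hle hge, ih]

-- ===== port A equals count + N =====

theorem foldl_congr_mem' {α β : Type} {l : List α} {f g : β → α → β} {b : β}
    (h : ∀ c x, x ∈ l → f c x = g c x) : l.foldl f b = l.foldl g b := by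
  induction l generalizing b with
  | nil => rfl
  | cons x t ih =>
    simp only [List.foldl_cons]
    rw [h b x (by simp)]
    exact ih (fun c y hy => h c y (by simp [hy]))

theorem shift_fold (tl : List Nat) (h : Nat → Nat) (c : Int) :
    ∀ a : Nat, (tl.map (fun k => c + ((h k : Nat) : Int))).foldl max (c + (a : Int))
      = c + ((tl.foldl (fun m i => max m (h i)) a : Nat) : Int) := by
  induction tl with
  | nil => intro a; simp
  | cons x t ih =>
    intro a
    simp only [List.map_cons, List.foldl_cons]
    have : max (c + (a : Int)) (c + (h x : Int)) = c + ((max a (h x) : Nat) : Int) := by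
      rw [max_add_add_left]
      congr 1
      push_cast
      rfl
    rw [this, ih]

theorem DFS_eq_N : ∀ (d : Nat) (cp : Int) (gi : List Int) (s : List Bool) (c : Int),
    0 ≤ cp → gi.length ≤ cp.toNat + d →
    DFS cp gi s c = c + (N (gi.drop cp.toNat) s : Int) := by
  intro d
  induction d with
  | zero =>
    intro cp gi s c h0 hd
    have hge : cp ≥ (gi.length : Int) := by omega
    rw [DFS]
    simp only [hge, ge_iff_le, dite_eq_ite, if_pos (by omega : (gi.length : Int) ≤ cp)]
    rw [List.drop_eq_nil_of_le (by omega)]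
    simp [N]
  | succ d ih =>
    intro cp gi s c h0 hd
    by_cases hge : cp ≥ (gi.length : Int)
    · rw [DFS]
      simp only [hge, ge_iff_le, dite_eq_ite, if_pos (by omega : (gi.length : Int) ≤ cp)]
      rw [List.drop_eq_nil_of_le (by omega)]
      simp [N]
    · have hlt : cp.toNat < gi.length := by omega
      rw [DFS]
      simp only [hge, dite_false]
      have hget : (PySem.List.pyGet? gi cp).getD 0 = gi[cp.toNat] := by
        rw [PySem.List.pyGet?_of_nonneg _ h0, List.getElem?_eq_getElem hlt]
        rfl
      rw [hget]
      set g := gi[cp.toNat] with hg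
      -- rewrite the loop into map over cand
      have hrange : PySem.List.pyRange 0 g 1 = (List.range g.toNat).map (fun k => ((k : Nat) : Int)) := by
        rw [PySem.List.pyRange_one]
        simp
      have hcounts :
          (PySem.List.pyRange 0 g 1).foldl
            (fun acc i =>
              if (PySem.List.pyGet? s i).getD false then
                acc ++ [DFS (cp + 1) gi (s.set i.toNat false) (c + 1)]
              else acc) []
          = (cand g s).map (fun k => DFS (cp + 1) gi (s.set k false) (c + 1)) := by
        rw [hrange, List.foldl_map]
        have : ∀ (acc : List Int),
            (List.range g.toNat).foldl
              (fun acc (k : Nat) =>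
                if (PySem.List.pyGet? s ((k : Nat) : Int)).getD false then
                  acc ++ [DFS (cp + 1) gi (s.set ((k : Nat) : Int).toNat false) (c + 1)]
                else acc) acc
            = (List.range g.toNat).foldl
              (fun acc (k : Nat) =>
                if s.getD k false then
                  acc ++ [DFS (cp + 1) gi (s.set k false) (c + 1)]
                else acc) acc := by
          intro acc
          apply foldl_congr_mem'
          intro b k _
          rw [PySem.List.pyGet?_natCast]
          simp [List.getD_eq_getElem?_getD]
        rw [this, PySem.List.foldl_append_if]
        simp [cand]
      rw [hcounts]
      -- IH on each recursive call
      have hdrop : gi.drop cp.toNat = g :: gi.drop (cp.toNat + 1) :=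
        List.drop_eq_getElem_cons hlt
      have htn : (cp + 1).toNat = cp.toNat + 1 := by omega
      have hmap : (cand g s).map (fun k => DFS (cp + 1) gi (s.set k false) (c + 1))
          = (cand g s).map (fun k => c + ((1 + N (gi.drop (cp.toNat + 1)) (s.set k false) : Nat) : Int)) := by
        apply List.map_congr_left
        intro k _
        rw [ih (cp + 1) gi (s.set k false) (c + 1) (by omega) (by omega), htn]
        push_cast
        ring
      rw [hmap, hdrop]
      -- now compute max? of the mapped list against N (g :: rest) s
      rw [N]
      cases hc : cand g s with
      | nil => simp [PySem.List.max?]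
      | cons i0 tl =>
        simp only [List.map_cons]
        rw [PySem.List.max?_id_cons]
        dsimp only
        rw [shift_fold tl (fun k => 1 + N (gi.drop (cp.toNat + 1)) (s.set k false)) c]
        simp only [List.foldl_cons, Nat.zero_max]

-- ===== port B equals count + G =====

theorem findBest_eq (s : List Bool) : ∀ (i : Int),
    findBest s i = match fb s (i + 1).toNat with
                   | none => -1
                   | some j => ((j : Nat) : Int) := by
  intro i
  by_cases hneg : i < 0
  · rw [findBest]
    have : (i + 1).toNat = 0 := by omega
    simp [hneg, this, fb]
  · have h0 : 0 ≤ i := by omega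
    have htn : (i + 1).toNat = i.toNat + 1 := by omega
    rw [findBest]
    have hget : (PySem.List.pyGet? s i).getD false = s.getD i.toNat false := by
      rw [PySem.List.pyGet?_of_nonneg _ h0]
      simp [List.getD_eq_getElem?_getD]
    rw [htn, fb]
    by_cases hv : s.getD i.toNat false = true
    · simp only [hneg, dite_false, hget, hv, if_true]
      exact (Int.toNat_of_nonneg h0).symm
    · simp only [hneg, dite_false, hget, hv, if_false, Bool.false_eq_true]
      have := findBest_eq s (i - 1)
      rw [this]
      have : (i - 1 + 1).toNat = i.toNat := by omega
      rw [this]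
termination_by i => (i + 1).toNat
decreasing_by omega

theorem fb_min_bound (s : List Bool) (g : Int) :
    fb s (min g (s.length : Int)).toNat = fb s g.toNat := by
  by_cases h : g ≤ (s.length : Int)
  · rw [min_eq_left h]
  · rw [min_eq_right (by omega)]
    have h1 : s.length ≤ g.toNat := by omega
    rw [fb_ge h1]
    simp

theorem bLoop_eq : ∀ (limits : List Int) (s : List Bool) (c : Int),
    bLoop limits s c = c + (G limits s : Int) := by
  intro limits
  induction limits with
  | nil => intro s c; simp [bLoop, G]
  | cons g rest ih =>
    intro s c
    rw [bLoop, G]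
    have hfb := findBest_eq s (min g (s.length : Int) - 1)
    have hmin : (min g (s.length : Int) - 1 + 1) = min g (s.length : Int) := by ring
    rw [hmin] at hfb
    rw [fb_min_bound] at hfb
    cases hf : fb s g.toNat with
    | none =>
      rw [hf] at hfb
      simp only [hfb]
      simp
    | some j =>
      rw [hf] at hfb
      simp only [hfb]
      have hne : ((j : Nat) : Int) ≠ -1 := by omega
      simp only [hne, if_false]
      have htn : ((j : Nat) : Int).toNat = j := by omega
      rw [htn, ih]
      push_cast
      ring

-- ===== VERDICT (by name: the statement is the Claim_ definition above) =====
theorem DFS_spec : Claim_equal_DFS := by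
  intro cp gi s c _ hpre
  unfold Spec_DFS
  obtain ⟨h0, -⟩ := hpre
  rw [DFS_eq_N (gi.length) cp gi s c h0 (by omega)]
  unfold DFS_alt
  rw [PySem.List.slice_from _ h0, bLoop_eq, N_eq_G]
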